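-- pv_equiv track=rewrite | github.com/navin123456789/MultiAgent_RAG | web_scraper.py | format_specific_content
-- ===== SOURCE A (Python) =====
-- from typing import List, Dict, Optional
--
-- def format_specific_content(content: Dict[str, str]) -> str:
--     """Format domain-specific content for display"""
--     if not content:
--         return ""
--
--     # Priority order for display
--     priority_keys = ['title', 'price', 'discount', 'stock', 'rating', 'date']
--     formatted = []
--
--     # Add priority items first
--     for key in priority_keys:
--         if key in content:
--             formatted.append(f"{key.title()}: {content[key]}")
--
--     # Add any remaining items
--     for key, value in content.items():
--         if key not in priority_keys:
--             formatted.append(f"{key.title()}: {value}")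
--
--     return '\n'.join(formatted)
-- ===== SOURCE B (Python) =====
-- def format_specific_content(content):
--     """Format domain-specific content for display"""
--     priority_keys = ['title', 'price', 'discount', 'stock', 'rating', 'date']
--     rank = {k: i for i, k in enumerate(priority_keys)}
--     sentinel = len(priority_keys)
--     buckets = {}
--     for key, value in content.items():
--         buckets.setdefault(rank.get(key, sentinel), []).append(f"{key.title()}: {value}")
--     return '\n'.join(line for r in range(sentinel + 1) for line in buckets.get(r, []))
-- ===== Notes on version B (the rewrite author's own statement) =====
-- stated objective: alternative
-- what changed: Replaces A's two phases (six 'key in content' membership scans plus a second pass over the items) by a single bucket pass over the items: a rank table maps each key to its priority index (sentinel 6 for the rest), lines are appended to per-rank buckets, and the buckets are emitted in rank order.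
import Mathlib
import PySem

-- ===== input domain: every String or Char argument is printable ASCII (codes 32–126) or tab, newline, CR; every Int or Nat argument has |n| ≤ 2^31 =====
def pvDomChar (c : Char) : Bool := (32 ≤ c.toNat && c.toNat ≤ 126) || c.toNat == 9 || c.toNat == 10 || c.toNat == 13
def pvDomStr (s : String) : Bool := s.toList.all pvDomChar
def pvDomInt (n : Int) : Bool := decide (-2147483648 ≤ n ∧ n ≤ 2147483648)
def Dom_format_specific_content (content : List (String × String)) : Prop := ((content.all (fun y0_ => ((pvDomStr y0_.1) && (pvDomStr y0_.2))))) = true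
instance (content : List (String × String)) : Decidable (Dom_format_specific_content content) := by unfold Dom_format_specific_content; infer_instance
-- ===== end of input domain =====

-- B replaces A's two phases (six membership scans over the dict, then a second pass over the
-- items) by one bucket pass over the items keyed by a rank table; same return value.

-- hand port of str.title() (exact on the ASCII domain: cased = alphabetic): a letter is
-- uppercased when the previous char is not a letter, lowercased otherwise
def pvTitleAux : Bool → List Char → List Char
  | _, [] => []
  | prev, c :: rest =>
    (if PySem.Chars.isalpha c then
      (if prev then PySem.Chars.lowerChar c else PySem.Chars.upperChar c)
     else c) :: pvTitleAux (PySem.Chars.isalpha c) rest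

def pvTitle (s : String) : String := String.ofList (pvTitleAux false s.toList)

def pvPriorityKeys : List String := ["title", "price", "discount", "stock", "rating", "date"]

-- f"{key.title()}: {value}"
def pvFmt (kv : String × String) : String := pvTitle kv.1 ++ ": " ++ kv.2

-- ===== PORT A =====
def format_specific_content (content : List (String × String)) : String :=
  if content = [] then ""
  else
    let d : PySem.Dict String String := PySem.Dict.mk content
    -- for key in priority_keys: if key in content: formatted.append(f"{key.title()}: {content[key]}")
    -- (content[key] is guarded by 'key in content', so get? is some; .getD "" is never the default)
    let formatted : List String :=
      pvPriorityKeys.foldl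
        (fun acc key => if d.contains key then acc ++ [pvFmt (key, (d.get? key).getD "")] else acc) []
    -- for key, value in content.items(): if key not in priority_keys: formatted.append(...)
    let formatted : List String :=
      content.foldl
        (fun acc kv => if !pvPriorityKeys.contains kv.1 then acc ++ [pvFmt kv] else acc) formatted
    PySem.Str.join "\n" formatted

-- ===== PORT B =====
-- rank = {k: i for i, k in enumerate(priority_keys)}
def pvRank : PySem.Dict String Int :=
  PySem.Dict.ofList ((PySem.List.enumerate pvPriorityKeys).map (fun p => (p.2, p.1)))

def format_specific_content_alt (content : List (String × String)) : String :=
  let sentinel : Int := (pvPriorityKeys.length : Int)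
  -- for key, value in content.items(): buckets.setdefault(rank.get(key, sentinel), []).append(...)
  let buckets : PySem.Dict Int (List String) :=
    content.foldl
      (fun d kv => d.modify (pvRank.getD kv.1 sentinel) [] (· ++ [pvFmt kv])) PySem.Dict.empty
  -- '\n'.join(line for r in range(sentinel + 1) for line in buckets.get(r, []))
  PySem.Str.join "\n" ((PySem.List.pyRange 0 (sentinel + 1) 1).flatMap (fun r => buckets.getD r []))

-- ===== PRECONDITION & SPEC =====
-- Pre_ excludes association lists with duplicate keys: a Python dict cannot hold them, so the
-- assoc-list encoding's behaviour there (first vs last value) is accidental and unspecified.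
def Pre_format_specific_content (content : List (String × String)) : Prop :=
  (content.map Prod.fst).Nodup
instance (content : List (String × String)) : Decidable (Pre_format_specific_content content) := by
  unfold Pre_format_specific_content; infer_instance

def pvWitness_format_specific_content : (List (String × String)) :=
  [("price", "9"), ("title", "hat"), ("a b", "2")]

def Spec_format_specific_content (content : List (String × String)) (out : String) : Prop := out = format_specific_content_alt content
instance (content : List (String × String)) (out : String) : Decidable (Spec_format_specific_content content out) := by unfold Spec_format_specific_content; infer_instance

-- ===== CLAIM (what is proved, stated in full; the proofs are below) =====
def Claim_equal_format_specific_content : Prop := ∀ (content : List (String × String)), Dom_format_specific_content content → Pre_format_specific_content content → Spec_format_specific_content content (format_specific_content content)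

-- ===== LEMMAS AND PROOFS =====

theorem pvRank_getD (k : String) :
    pvRank.getD k 6 =
      if "title" == k then 0 else if "price" == k then 1 else if "discount" == k then 2
      else if "stock" == k then 3 else if "rating" == k then 4 else if "date" == k then 5
      else 6 := by
  have h : pvRank = PySem.Dict.mk
      [("title", 0), ("price", 1), ("discount", 2), ("stock", 3), ("rating", 4), ("date", 5)] := by
    decide
  rw [h]
  simp only [PySem.Dict.getD, PySem.Dict.get?_mk_cons]
  split_ifs <;> simp [PySem.Dict.get?]

-- the filtered-then-mapped priority list, one literal key at a time
theorem pv_filter_map_cons {α β : Type} (p : α → Bool) (f : α → β) (x : α) (l : List α) :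
    ((x :: l).filter p).map f
      = (if p x then [f x] else []) ++ (l.filter p).map f := by
  by_cases h : p x <;> simp [h]

-- under Nodup keys, the items whose key equals p are exactly the dict hit on p
theorem pv_bucket_key (content : List (String × String)) (p : String)
    (h : (content.map Prod.fst).Nodup) :
    (content.filter (fun kv => kv.1 == p)).map pvFmt
      = if (PySem.Dict.mk content).contains p then
          [pvFmt (p, ((PySem.Dict.mk content).get? p).getD "")] else [] := by
  induction content with
  | nil => simp [PySem.Dict.contains_mk]
  | cons kv rest ih =>
    obtain ⟨k, v⟩ := kv
    simp only [List.map_cons, List.nodup_cons] at h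
    by_cases hk : k = p
    · subst hk
      have hrest : rest.filter (fun kv' => kv'.1 == k) = [] := by
        rw [List.filter_eq_nil_iff]
        intro a ha
        simp only [beq_iff_eq]
        intro hap
        exact h.1 (by rw [← hap]; exact List.mem_map_of_mem ha)
      simp [hrest, PySem.Dict.contains_mk, PySem.Dict.get?_mk_cons, pvFmt]
    · have hne : (k == p) = false := by simp [hk]
      simp [hne, PySem.Dict.contains_mk, PySem.Dict.get?_mk_cons, ih h.2]
      simp only [hne, Bool.false_or]
      split_ifs <;> rfl

set_option maxHeartbeats 1000000 in
theorem pv_join_arg (content : List (String × String))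
    (h : (content.map Prod.fst).Nodup) :
    (content.foldl
        (fun acc kv => if !pvPriorityKeys.contains kv.1 then acc ++ [pvFmt kv] else acc)
        (pvPriorityKeys.foldl
          (fun acc key => if (PySem.Dict.mk content).contains key then
              acc ++ [pvFmt (key, ((PySem.Dict.mk content).get? key).getD "")] else acc) []))
      = ((PySem.List.pyRange 0 ((pvPriorityKeys.length : Int) + 1) 1).flatMap
          (fun r =>
            (content.foldl
              (fun d kv => d.modify (pvRank.getD kv.1 (pvPriorityKeys.length : Int)) []
                (· ++ [pvFmt kv])) PySem.Dict.empty).getD r [])) := by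
  have hlen : ((pvPriorityKeys.length : Int)) = 6 := by decide
  rw [hlen]
  rw [PySem.List.foldl_append_if (p := fun kv => !pvPriorityKeys.contains kv.1) (f := pvFmt)]
  rw [PySem.List.foldl_append_if (p := fun key => (PySem.Dict.mk content).contains key)
        (f := fun key => pvFmt (key, ((PySem.Dict.mk content).get? key).getD ""))]
  rw [← List.foldl_map (f := fun kv : String × String => (pvRank.getD kv.1 6, pvFmt kv))
        (g := fun (d : PySem.Dict Int (List String)) (p : Int × String) => d.modify p.1 [] (· ++ [p.2]))]
  rw [show PySem.List.pyRange 0 (6 + 1) 1 = [0, 1, 2, 3, 4, 5, 6] from by decide]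
  simp only [List.flatMap_cons, List.flatMap_nil, List.append_nil, List.nil_append]
  simp only [PySem.Dict.getD_foldl_modify_append]
  simp only [show ∀ r : Int, (PySem.Dict.empty : PySem.Dict Int (List String)).getD r [] = [] from fun r => rfl, List.nil_append]
  simp only [List.filter_map, List.map_map, Function.comp_def]
  have key : ∀ (i : Int) (p : String), (∀ k : String, ((pvRank.getD k 6) == i) = (k == p)) →
      (content.filter (fun kv => pvRank.getD kv.1 6 == i)).map pvFmt
        = if (PySem.Dict.mk content).contains p then
            [pvFmt (p, ((PySem.Dict.mk content).get? p).getD "")] else [] := by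
    intro i p hip
    rw [List.filter_congr (fun kv _ => hip kv.1), pv_bucket_key content p h]
  have k0 := key 0 "title" (fun k => by rw [pvRank_getD]; split_ifs <;> simp_all <;> (repeat' apply And.intro) <;>
      first | exact Ne.symm (by assumption) | (subst_vars; decide))
  have k1 := key 1 "price" (fun k => by rw [pvRank_getD]; split_ifs <;> simp_all <;> (repeat' apply And.intro) <;>
      first | exact Ne.symm (by assumption) | (subst_vars; decide))
  have k2 := key 2 "discount" (fun k => by rw [pvRank_getD]; split_ifs <;> simp_all <;> (repeat' apply And.intro) <;>
      first | exact Ne.symm (by assumption) | (subst_vars; decide))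
  have k3 := key 3 "stock" (fun k => by rw [pvRank_getD]; split_ifs <;> simp_all <;> (repeat' apply And.intro) <;>
      first | exact Ne.symm (by assumption) | (subst_vars; decide))
  have k4 := key 4 "rating" (fun k => by rw [pvRank_getD]; split_ifs <;> simp_all <;> (repeat' apply And.intro) <;>
      first | exact Ne.symm (by assumption) | (subst_vars; decide))
  have k5 := key 5 "date" (fun k => by rw [pvRank_getD]; split_ifs <;> simp_all <;> (repeat' apply And.intro) <;>
      first | exact Ne.symm (by assumption) | (subst_vars; decide))
  have k6 : (content.filter (fun kv => pvRank.getD kv.1 6 == (6 : Int))).map pvFmt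
      = (content.filter (fun kv => !pvPriorityKeys.contains kv.1)).map pvFmt := by
    have hpt : ∀ kv ∈ content, (pvRank.getD kv.1 6 == (6 : Int)) = (!pvPriorityKeys.contains kv.1) := by
      intro kv _
      rw [pvRank_getD]; split_ifs <;> simp_all [pvPriorityKeys] <;> (repeat' apply And.intro) <;>
        first | exact Ne.symm (by assumption) | (subst_vars; decide)
    rw [List.filter_congr hpt]
  rw [k0, k1, k2, k3, k4, k5, k6]
  rw [show pvPriorityKeys = "title" :: "price" :: "discount" :: "stock" :: "rating" :: "date" :: ([] : List String) from rfl]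
  rw [pv_filter_map_cons, pv_filter_map_cons, pv_filter_map_cons, pv_filter_map_cons,
      pv_filter_map_cons, pv_filter_map_cons]
  simp [List.append_assoc]

theorem format_specific_content_spec : Claim_equal_format_specific_content := by
  intro content _ hpre
  unfold Spec_format_specific_content
  by_cases hc : content = []
  · subst hc; decide
  · unfold format_specific_content format_specific_content_alt
    rw [if_neg hc]
    exact congrArg (PySem.Str.join "\n") (pv_join_arg content hpre)
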